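-- pv_equiv track=rewrite | github.com/Cotorrra/Sr.Cotorre-discord-edition | src/e_cards/search.py | use_ec_keywords
-- ===== SOURCE A (Python) =====
-- def use_ec_keywords(cards: list, query: dict):
--     """
--     Filter encounter cards according to the key_list
--     :param cards: Encounter card list
--     :param query: Filter parameters
--     :return:
--     """
--     # TODO: Rework this info reading all the info from key_list
--     filtered_cards = cards.copy()
--
--     if "card_type" in query and query["card_type"]:
--         char = query["card_type"].lower()
--         if char == "e":
--             filtered_cards = [c for c in filtered_cards if c["type_code"] == "enemy"]
--         if char == "a":
--             filtered_cards = [c for c in filtered_cards if c["type_code"] == "act"]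
--         if char == "p":
--             filtered_cards = [c for c in filtered_cards if c["type_code"] == "agenda"]
--         if char == "t":
--             filtered_cards = [
--                 c for c in filtered_cards if c["type_code"] == "treachery"
--             ]
--         if char == "s":
--             filtered_cards = [c for c in filtered_cards if c["type_code"] == "scenario"]
--         if char == "l":
--             filtered_cards = [c for c in filtered_cards if c["type_code"] == "location"]
--         if char == "j":
--             filtered_cards = [
--                 c
--                 for c in filtered_cards
--                 if c["type_code"] in ["asset", "event", "skill"]
--             ]
--
--     if "traits" in query and query["traits"]:
--         traits = query["traits"].split(",")
--         traits = [t.strip() for t in traits]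
--         filtered_cards = [c for c in filtered_cards if "traits" in c]
--
--         for trait in traits:
--             # This is a workaround to avoid the last dot in the traits
--             filtered_cards = [
--                 c for c in filtered_cards if trait in c["traits"][:-1].split(". ")
--             ]
--
--     return filtered_cards
-- ===== SOURCE B (Python) =====
-- _TYPE_MAP = {
--     "e": {"enemy"},
--     "a": {"act"},
--     "p": {"agenda"},
--     "t": {"treachery"},
--     "s": {"scenario"},
--     "l": {"location"},
--     "j": {"asset", "event", "skill"},
-- }
--
--
-- def use_ec_keywords(cards: list, query: dict):
--     """Filter encounter cards by type and traits in one pass."""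
--     allowed = None
--     card_type = query.get("card_type")
--     if card_type:
--         allowed = _TYPE_MAP.get(card_type.lower())
--
--     traits = None
--     raw_traits = query.get("traits")
--     if raw_traits:
--         traits = [t.strip() for t in raw_traits.split(",")]
--
--     def keep(c):
--         if allowed is not None and c["type_code"] not in allowed:
--             return False
--         if traits is not None:
--             if "traits" not in c:
--                 return False
--             parts = c["traits"][:-1].split(". ")
--             if not all(t in parts for t in traits):
--                 return False
--         return True
--
--     return [c for c in cards if keep(c)]
-- ===== Notes on version B (the rewrite author's own statement) =====
-- stated objective: simpler
-- what changed: Replaces the if-chain of up to eight successive list rebuilds (one per type branch plus one per trait) with a table lookup of the allowed type_codes and a single pass over cards with one composite predicate; traits are parsed once up front.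
-- outside the precondition, e.g. on use_ec_keywords([{'name': 'x'}], {'card_type': 'e'}): A raises KeyError, B raises KeyError
import Mathlib
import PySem

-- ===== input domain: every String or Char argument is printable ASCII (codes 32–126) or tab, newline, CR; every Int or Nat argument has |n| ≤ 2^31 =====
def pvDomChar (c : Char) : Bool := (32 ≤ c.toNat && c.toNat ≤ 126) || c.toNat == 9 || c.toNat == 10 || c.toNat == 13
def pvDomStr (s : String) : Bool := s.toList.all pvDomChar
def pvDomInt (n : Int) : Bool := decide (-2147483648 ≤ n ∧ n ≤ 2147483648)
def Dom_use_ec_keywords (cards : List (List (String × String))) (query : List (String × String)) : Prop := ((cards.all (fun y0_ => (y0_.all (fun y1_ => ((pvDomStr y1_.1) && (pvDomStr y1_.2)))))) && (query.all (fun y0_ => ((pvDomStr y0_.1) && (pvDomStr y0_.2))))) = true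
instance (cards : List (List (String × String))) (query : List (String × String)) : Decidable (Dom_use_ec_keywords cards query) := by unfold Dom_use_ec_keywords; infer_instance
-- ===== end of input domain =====

-- B replaces A's chain of up to nine successive list rebuilds by a lookup table of
-- allowed type_codes plus a single pass over cards with one composite predicate (objective: simpler).

-- shared helper: c["traits"][:-1].split(". ")  (split? is total here since ". " ≠ "")
def pvSplitParts (s : String) : List String :=
  (PySem.Str.split? (PySem.Str.slice s none (some (-1))) ". ").getD []

-- ===== PORT A =====
def use_ec_keywords (cards : List (List (String × String))) (query : List (String × String)) : List (List (String × String)) :=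
  let filtered := cards
  let filtered :=
    match (PySem.Dict.mk query).get? "card_type" with
    | none => filtered
    | some v =>
      if v = "" then filtered else
      let ch := PySem.Str.lower v
      let f := filtered
      let f := if ch = "e" then f.filter (fun c => (PySem.Dict.mk c).getD "type_code" "" == "enemy") else f
      let f := if ch = "a" then f.filter (fun c => (PySem.Dict.mk c).getD "type_code" "" == "act") else f
      let f := if ch = "p" then f.filter (fun c => (PySem.Dict.mk c).getD "type_code" "" == "agenda") else f
      let f := if ch = "t" then f.filter (fun c => (PySem.Dict.mk c).getD "type_code" "" == "treachery") else f
      let f := if ch = "s" then f.filter (fun c => (PySem.Dict.mk c).getD "type_code" "" == "scenario") else f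
      let f := if ch = "l" then f.filter (fun c => (PySem.Dict.mk c).getD "type_code" "" == "location") else f
      let f := if ch = "j" then f.filter (fun c => (["asset", "event", "skill"] : List String).contains ((PySem.Dict.mk c).getD "type_code" "")) else f
      f
  match (PySem.Dict.mk query).get? "traits" with
  | none => filtered
  | some v =>
    if v = "" then filtered else
    let traits := ((PySem.Str.split? v ",").getD []).map PySem.Str.strip
    let f := filtered.filter (fun c => ((PySem.Dict.mk c).get? "traits").isSome)
    traits.foldl (fun f t => f.filter (fun c => (pvSplitParts ((PySem.Dict.mk c).getD "traits" "")).contains t)) f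

-- ===== PORT B =====
def pvTypeMap : PySem.Dict String (List String) :=
  PySem.Dict.mk [("e", ["enemy"]), ("a", ["act"]), ("p", ["agenda"]), ("t", ["treachery"]),
                 ("s", ["scenario"]), ("l", ["location"]), ("j", ["asset", "event", "skill"])]

def pvKeep (allowed : Option (List String)) (traits : Option (List String)) (c : List (String × String)) : Bool :=
  (match allowed with
   | none => true
   | some al => al.contains ((PySem.Dict.mk c).getD "type_code" "")) &&
  (match traits with
   | none => true
   | some ts =>
     match (PySem.Dict.mk c).get? "traits" with
     | none => false
     | some tv => ts.all (fun t => (pvSplitParts tv).contains t))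

def use_ec_keywords_alt (cards : List (List (String × String))) (query : List (String × String)) : List (List (String × String)) :=
  let allowed :=
    match (PySem.Dict.mk query).get? "card_type" with
    | none => none
    | some v => if v = "" then none else pvTypeMap.get? (PySem.Str.lower v)
  let traits :=
    match (PySem.Dict.mk query).get? "traits" with
    | none => none
    | some v => if v = "" then none else some (((PySem.Str.split? v ",").getD []).map PySem.Str.strip)
  cards.filter (pvKeep allowed traits)

-- ===== PRECONDITION & SPEC =====
-- Pre_ excludes exactly the inputs where Python A raises KeyError: an active card_type filter
-- (one of the seven letters) while some card lacks the "type_code" key.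
def Pre_use_ec_keywords (cards : List (List (String × String))) (query : List (String × String)) : Prop :=
  ((PySem.Dict.mk query).get? "card_type").getD "" = "" ∨
    (PySem.Str.lower (((PySem.Dict.mk query).get? "card_type").getD "")) ∉ (["e", "a", "p", "t", "s", "l", "j"] : List String) ∨
    ∀ c ∈ cards, ((PySem.Dict.mk c).get? "type_code").isSome = true
instance (cards : List (List (String × String))) (query : List (String × String)) : Decidable (Pre_use_ec_keywords cards query) := by unfold Pre_use_ec_keywords; infer_instance

def pvWitness_use_ec_keywords : (List (List (String × String))) × (List (String × String)) :=
  ([[("type_code", "enemy"), ("traits", "Geist. Monster.")], [("type_code", "act")]], [("card_type", "e")])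

def Spec_use_ec_keywords (cards : List (List (String × String))) (query : List (String × String)) (out : List (List (String × String))) : Prop := out = use_ec_keywords_alt cards query
instance (cards : List (List (String × String))) (query : List (String × String)) (out : List (List (String × String))) : Decidable (Spec_use_ec_keywords cards query out) := by unfold Spec_use_ec_keywords; infer_instance

-- ===== CLAIM (what is proved, stated in full; the proofs are below) =====
def Claim_equal_use_ec_keywords : Prop := ∀ (cards : List (List (String × String))) (query : List (String × String)), Dom_use_ec_keywords cards query → Pre_use_ec_keywords cards query → Spec_use_ec_keywords cards query (use_ec_keywords cards query)

-- ===== LEMMAS AND PROOFS =====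

-- proof-side normal forms for the two stages of A
def pvTypeBlock (tp : Option (List String)) (l : List (List (String × String))) : List (List (String × String)) :=
  match tp with
  | none => l
  | some al => l.filter (fun c => al.contains ((PySem.Dict.mk c).getD "type_code" ""))

def pvTraitBlock (ts : Option (List String)) (l : List (List (String × String))) : List (List (String × String)) :=
  match ts with
  | none => l
  | some tsl =>
    tsl.foldl (fun f t => f.filter (fun c => (pvSplitParts ((PySem.Dict.mk c).getD "traits" "")).contains t))
      (l.filter (fun c => ((PySem.Dict.mk c).get? "traits").isSome))

-- A's per-trait sequence of filters equals one filter with the conjunction of the trait tests.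
theorem pv_foldl_filter {α : Type} (q : String → α → Bool) (ts : List String) (l : List α) :
    ts.foldl (fun f t => f.filter (q t)) l = l.filter (fun c => ts.all (fun t => q t c)) := by
  induction ts generalizing l with
  | nil => simp
  | cons t ts ih => simp [List.foldl_cons, ih, List.filter_filter, Bool.and_comm]

-- A's seven-branch if-chain equals B's table lookup followed by one filter.
theorem pv_chain (ch : String) (l : List (List (String × String))) :
    (let f := l
     let f := if ch = "e" then f.filter (fun c => (PySem.Dict.mk c).getD "type_code" "" == "enemy") else f
     let f := if ch = "a" then f.filter (fun c => (PySem.Dict.mk c).getD "type_code" "" == "act") else f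
     let f := if ch = "p" then f.filter (fun c => (PySem.Dict.mk c).getD "type_code" "" == "agenda") else f
     let f := if ch = "t" then f.filter (fun c => (PySem.Dict.mk c).getD "type_code" "" == "treachery") else f
     let f := if ch = "s" then f.filter (fun c => (PySem.Dict.mk c).getD "type_code" "" == "scenario") else f
     let f := if ch = "l" then f.filter (fun c => (PySem.Dict.mk c).getD "type_code" "" == "location") else f
     let f := if ch = "j" then f.filter (fun c => (["asset", "event", "skill"] : List String).contains ((PySem.Dict.mk c).getD "type_code" "")) else f
     f)
    = pvTypeBlock (pvTypeMap.get? ch) l := by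
  by_cases h1 : ch = "e"
  · subst h1; simp [pvTypeBlock, pvTypeMap, PySem.Dict.get?_mk_cons]
    exact List.filter_congr (fun c _ => by rw [Bool.eq_iff_iff]; simp)
  by_cases h2 : ch = "a"
  · subst h2; simp [pvTypeBlock, pvTypeMap, PySem.Dict.get?_mk_cons]
    exact List.filter_congr (fun c _ => by rw [Bool.eq_iff_iff]; simp)
  by_cases h3 : ch = "p"
  · subst h3; simp [pvTypeBlock, pvTypeMap, PySem.Dict.get?_mk_cons]
    exact List.filter_congr (fun c _ => by rw [Bool.eq_iff_iff]; simp)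
  by_cases h4 : ch = "t"
  · subst h4; simp [pvTypeBlock, pvTypeMap, PySem.Dict.get?_mk_cons]
    exact List.filter_congr (fun c _ => by rw [Bool.eq_iff_iff]; simp)
  by_cases h5 : ch = "s"
  · subst h5; simp [pvTypeBlock, pvTypeMap, PySem.Dict.get?_mk_cons]
    exact List.filter_congr (fun c _ => by rw [Bool.eq_iff_iff]; simp)
  by_cases h6 : ch = "l"
  · subst h6; simp [pvTypeBlock, pvTypeMap, PySem.Dict.get?_mk_cons]
    exact List.filter_congr (fun c _ => by rw [Bool.eq_iff_iff]; simp)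
  by_cases h7 : ch = "j"
  · subst h7; simp [pvTypeBlock, pvTypeMap, PySem.Dict.get?_mk_cons]
  · simp [pvTypeBlock, pvTypeMap, PySem.Dict.get?, h1, h2, h3, h4, h5, h6, h7, Ne.symm]

-- the two stages composed equal B's single filter with the composite predicate
theorem pv_combine (tp ts : Option (List String)) (cards : List (List (String × String))) :
    pvTraitBlock ts (pvTypeBlock tp cards) = cards.filter (pvKeep tp ts) := by
  cases ts with
  | none =>
    cases tp with
    | none =>
      have h : pvKeep none none = fun (_ : List (String × String)) => true := funext fun _ => rfl
      simp [pvTraitBlock, pvTypeBlock, h]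
    | some al =>
      simp only [pvTraitBlock, pvTypeBlock]
      exact List.filter_congr (fun c _ => by simp [pvKeep])
  | some tsl =>
    have hstep : ∀ l : List (List (String × String)),
        pvTraitBlock (some tsl) l
          = l.filter (fun c =>
              match (PySem.Dict.mk c).get? "traits" with
              | none => false
              | some tv => tsl.all (fun t => (pvSplitParts tv).contains t)) := by
      intro l
      simp only [pvTraitBlock]
      rw [pv_foldl_filter, List.filter_filter]
      refine List.filter_congr (fun c _ => ?_)
      cases h : (PySem.Dict.mk c).get? "traits" with
      | none => simp
      | some tv => simp [PySem.Dict.getD, h]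
    cases tp with
    | none =>
      rw [hstep]
      simp only [pvTypeBlock]
      exact List.filter_congr (fun c _ => by simp [pvKeep])
    | some al =>
      rw [hstep]
      simp only [pvTypeBlock]
      rw [List.filter_filter]
      exact List.filter_congr (fun c _ => by simp [pvKeep, Bool.and_comm])

theorem pv_main (cards : List (List (String × String))) (query : List (String × String)) :
    use_ec_keywords cards query = use_ec_keywords_alt cards query := by
  unfold use_ec_keywords use_ec_keywords_alt
  cases hct : (PySem.Dict.mk query).get? "card_type" with
  | none =>
    cases htr : (PySem.Dict.mk query).get? "traits" with
    | none => exact pv_combine none none cards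
    | some v =>
      by_cases hv : v = ""
      · simp only [if_pos hv]
        exact pv_combine none none cards
      · simp only [if_neg hv]
        exact pv_combine none (some (((PySem.Str.split? v ",").getD []).map PySem.Str.strip)) cards
  | some v =>
    by_cases hv : v = ""
    · simp only [if_pos hv]
      cases htr : (PySem.Dict.mk query).get? "traits" with
      | none => exact pv_combine none none cards
      | some w =>
        by_cases hw : w = ""
        · simp only [if_pos hw]
          exact pv_combine none none cards
        · simp only [if_neg hw]
          exact pv_combine none (some (((PySem.Str.split? w ",").getD []).map PySem.Str.strip)) cards
    · simp only [if_neg hv]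
      have hc := pv_chain (PySem.Str.lower v) cards
      cases htr : (PySem.Dict.mk query).get? "traits" with
      | none => exact hc.trans (pv_combine (pvTypeMap.get? (PySem.Str.lower v)) none cards)
      | some w =>
        by_cases hw : w = ""
        · simp only [if_pos hw]
          exact hc.trans (pv_combine (pvTypeMap.get? (PySem.Str.lower v)) none cards)
        · simp only [if_neg hw]
          exact (congrArg (pvTraitBlock (some (((PySem.Str.split? w ",").getD []).map PySem.Str.strip))) hc).trans
            (pv_combine (pvTypeMap.get? (PySem.Str.lower v)) (some (((PySem.Str.split? w ",").getD []).map PySem.Str.strip)) cards)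

-- ===== VERDICT (by name: the statement is the Claim_ definition above) =====
theorem use_ec_keywords_spec : Claim_equal_use_ec_keywords := by
  intro cards query _ _
  unfold Spec_use_ec_keywords
  exact pv_main cards query
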